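-- pv_equiv track=rewrite | github.com/Pratham-1604/trip-planner-genai | server/features/iternary_generation/basic_tag_personalization.py | apply_personalization
-- ===== SOURCE A (Python) =====
-- def apply_personalization(itinerary: dict, tags: list):
--     for day in itinerary["itinerary"]:
--         for tag in tags:
--             if tag == "heritage":
--                 day["note"] = "Include cultural and historical sites."
--             elif tag == "nightlife":
--                 day["note"] = "Add evening clubs, lounges, or beach parties."
--             elif tag == "adventure":
--                 day["note"] = "Suggest outdoor/adventure sports."
--             elif tag == "food":
--                 day["note"] = "Include local street food or special restaurants."
--     return itinerary
-- ===== SOURCE B (Python) =====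
-- _NOTES = {
--     "heritage": "Include cultural and historical sites.",
--     "nightlife": "Add evening clubs, lounges, or beach parties.",
--     "adventure": "Suggest outdoor/adventure sports.",
--     "food": "Include local street food or special restaurants.",
-- }
--
--
-- def apply_personalization(itinerary: dict, tags: list):
--     note = None
--     for tag in tags:
--         if tag in _NOTES:
--             note = _NOTES[tag]
--     if note is not None:
--         for day in itinerary["itinerary"]:
--             day["note"] = note
--     return itinerary
-- ===== Notes on version B (the rewrite author's own statement) =====
-- stated objective: alternative
-- what changed: B resolves the winning note in one pass over tags via a tag->note dict, then writes it once per day, replacing A's nested day-by-tag loop; Pre_ requires the 'itinerary' key (A raises KeyError without it) and duplicate-free outer keys (an association-list artefact that no Python dict input can exhibit).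
import Mathlib
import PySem

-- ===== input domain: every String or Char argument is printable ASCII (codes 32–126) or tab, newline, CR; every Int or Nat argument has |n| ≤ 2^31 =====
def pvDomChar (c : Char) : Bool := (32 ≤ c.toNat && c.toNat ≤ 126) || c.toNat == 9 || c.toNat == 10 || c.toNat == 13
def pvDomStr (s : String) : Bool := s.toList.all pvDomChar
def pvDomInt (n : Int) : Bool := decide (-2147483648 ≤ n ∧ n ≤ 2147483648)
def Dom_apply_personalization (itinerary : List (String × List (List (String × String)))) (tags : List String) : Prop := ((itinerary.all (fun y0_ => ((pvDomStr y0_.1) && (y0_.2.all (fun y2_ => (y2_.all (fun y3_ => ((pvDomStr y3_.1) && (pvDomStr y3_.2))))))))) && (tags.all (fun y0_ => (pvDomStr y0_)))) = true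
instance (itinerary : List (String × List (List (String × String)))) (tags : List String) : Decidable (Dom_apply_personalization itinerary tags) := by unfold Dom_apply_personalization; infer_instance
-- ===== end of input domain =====

-- B replaces A's nested day×tag loop by one pass over tags (last matching tag wins) and one
-- pass over the days. A mutates its argument in place; the equivalence proved here is about
-- the return value only.

-- ===== PORT A =====
-- one iteration of A's inner 'for tag in tags' body on one day
def pvStepA (day : PySem.Dict String String) (tag : String) : PySem.Dict String String :=
  if tag = "heritage" then day.insert "note" "Include cultural and historical sites."
  else if tag = "nightlife" then day.insert "note" "Add evening clubs, lounges, or beach parties."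
  else if tag = "adventure" then day.insert "note" "Suggest outdoor/adventure sports."
  else if tag = "food" then day.insert "note" "Include local street food or special restaurants."
  else day

def apply_personalization (itinerary : List (String × List (List (String × String)))) (tags : List String) : List (String × List (List (String × String))) :=
  let d := PySem.Dict.mk itinerary
  match d.get? "itinerary" with
  | none => itinerary   -- KeyError in Python; excluded by Pre_
  | some days =>
      -- for day in itinerary["itinerary"]: for tag in tags: …  (in-place update, written back)
      let days' := days.map (fun day => (tags.foldl pvStepA (PySem.Dict.mk day)).items)
      (d.insert "itinerary" days').items

-- ===== PORT B =====
def pvNotes : PySem.Dict String String := PySem.Dict.mk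
  [("heritage", "Include cultural and historical sites."),
   ("nightlife", "Add evening clubs, lounges, or beach parties."),
   ("adventure", "Suggest outdoor/adventure sports."),
   ("food", "Include local street food or special restaurants.")]

-- note = None; for tag in tags: if tag in _NOTES: note = _NOTES[tag]
def pvNoteB (tags : List String) : Option String :=
  tags.foldl (fun acc tag => match pvNotes.get? tag with | some n => some n | none => acc) none

def apply_personalization_alt (itinerary : List (String × List (List (String × String)))) (tags : List String) : List (String × List (List (String × String))) :=
  match pvNoteB tags with
  | none => itinerary
  | some note =>
      let d := PySem.Dict.mk itinerary
      match d.get? "itinerary" with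
      | none => itinerary   -- KeyError in Python; excluded by Pre_
      | some days =>
          (d.insert "itinerary" (days.map (fun day => ((PySem.Dict.mk day).insert "note" note).items))).items

-- ===== PRECONDITION & SPEC =====
-- Pre_ requires the "itinerary" key (A raises KeyError without it) and duplicate-free outer
-- keys: a duplicate-keyed association list cannot arise from any Python dict input.
def Pre_apply_personalization (itinerary : List (String × List (List (String × String)))) (tags : List String) : Prop :=
  "itinerary" ∈ itinerary.map Prod.fst ∧ (itinerary.map Prod.fst).Nodup
instance (itinerary : List (String × List (List (String × String)))) (tags : List String) : Decidable (Pre_apply_personalization itinerary tags) := by unfold Pre_apply_personalization; infer_instance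

def pvWitness_apply_personalization : (List (String × List (List (String × String)))) × List String :=
  ([("itinerary", [[("activity", "walk")]])], ["heritage"])

def Spec_apply_personalization (itinerary : List (String × List (List (String × String)))) (tags : List String) (out : List (String × List (List (String × String)))) : Prop := out = apply_personalization_alt itinerary tags
instance (itinerary : List (String × List (List (String × String)))) (tags : List String) (out : List (String × List (List (String × String)))) : Decidable (Spec_apply_personalization itinerary tags out) := by unfold Spec_apply_personalization; infer_instance

-- ===== CLAIM (what is proved, stated in full; the proofs are below) =====
def Claim_equal_apply_personalization : Prop := ∀ (itinerary : List (String × List (List (String × String)))) (tags : List String), Dom_apply_personalization itinerary tags → Pre_apply_personalization itinerary tags → Spec_apply_personalization itinerary tags (apply_personalization itinerary tags)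

-- ===== LEMMAS AND PROOFS =====

-- the accumulator of B's note loop only matters when no later tag matches
lemma noteB_foldl (ts : List String) (a : Option String) :
    ts.foldl (fun acc tag => match pvNotes.get? tag with | some n => some n | none => acc) a
      = match pvNoteB ts with | some n => some n | none => a := by
  induction ts generalizing a with
  | nil => rfl
  | cons t ts ih =>
      simp only [pvNoteB, List.foldl_cons] at ih ⊢
      rw [ih]
      conv_rhs => rw [ih]
      cases hb : List.foldl (fun acc tag => match pvNotes.get? tag with | some n => some n | none => acc) none ts <;>
        cases hg : pvNotes.get? t <;> simp

lemma noteB_cons (t : String) (ts : List String) :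
    pvNoteB (t :: ts)
      = match pvNoteB ts with
        | some n => some n
        | none => match pvNotes.get? t with | some n => some n | none => none := by
  show List.foldl _ _ ts = _
  rw [noteB_foldl]

-- A's inner tag loop on one day equals: insert the winning note, or leave the day alone
lemma stepA_fold (tags : List String) (day : PySem.Dict String String) :
    tags.foldl pvStepA day
      = match pvNoteB tags with
        | none => day
        | some n => day.insert "note" n := by
  induction tags generalizing day with
  | nil => rfl
  | cons t ts ih =>
      rw [List.foldl_cons, ih, noteB_cons]
      by_cases h1 : t = "heritage"
      · subst h1; cases h : pvNoteB ts <;>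
          simp [pvStepA, pvNotes, PySem.Dict.get?_mk_cons, PySem.Dict.insert_insert_self]
      · by_cases h2 : t = "nightlife"
        · subst h2; cases h : pvNoteB ts <;>
            simp [pvStepA, pvNotes, PySem.Dict.get?_mk_cons, PySem.Dict.insert_insert_self]
        · by_cases h3 : t = "adventure"
          · subst h3; cases h : pvNoteB ts <;>
              simp [pvStepA, pvNotes, PySem.Dict.get?_mk_cons, PySem.Dict.insert_insert_self]
          · by_cases h4 : t = "food"
            · subst h4; cases h : pvNoteB ts <;>
                simp [pvStepA, pvNotes, PySem.Dict.get?_mk_cons, PySem.Dict.insert_insert_self]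
            · have hg : pvNotes.get? t = none := by
                simp only [pvNotes, PySem.Dict.get?_mk_cons]
                have e1 : ("heritage" == t) = false := by simp; exact fun e => h1 e.symm
                have e2 : ("nightlife" == t) = false := by simp; exact fun e => h2 e.symm
                have e3 : ("adventure" == t) = false := by simp; exact fun e => h3 e.symm
                have e4 : ("food" == t) = false := by simp; exact fun e => h4 e.symm
                simp only [e1, e2, e3, e4, Bool.false_eq_true, if_false]
                rfl
              cases h : pvNoteB ts <;> simp [pvStepA, h1, h2, h3, h4, hg]

-- re-inserting the looked-up value of a duplicate-free assoc list changes nothing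
lemma overwrite_self {α : Type} (l : List (String × α)) (k : String) (v : α)
    (hnd : (l.map Prod.fst).Nodup) (h : (PySem.Dict.mk l).get? k = some v) :
    l.map (fun p => if p.1 == k then (k, v) else p) = l := by
  induction l with
  | nil => simp
  | cons p rest ih =>
      obtain ⟨k', v'⟩ := p
      simp only [List.map_cons, List.nodup_cons] at hnd
      rw [PySem.Dict.get?_mk_cons] at h
      by_cases hk : k' = k
      · subst hk
        simp only [beq_self_eq_true, if_pos] at h ⊢
        obtain rfl : v' = v := by simpa using h
        have hq : ∀ q ∈ rest, (fun p => if p.1 == k' then (k', v') else p) q = q := by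
          intro q hq
          have : q.1 ≠ k' := fun e => hnd.1 (e ▸ List.mem_map_of_mem hq)
          simp [this]
        rw [List.map_cons, List.map_congr_left hq, List.map_id']
        simp
      · have hbeq : (k' == k) = false := by simp [hk]
        simp only [hbeq, Bool.false_eq_true, if_false] at h
        simp only [List.map_cons, hbeq, Bool.false_eq_true, if_false, ih hnd.2 h]

-- ===== VERDICT (by name: the statement is the Claim_ definition above) =====
theorem apply_personalization_spec : Claim_equal_apply_personalization := by
  intro it tags _ hpre
  obtain ⟨hmem, hnd⟩ := hpre
  have hkeys : "itinerary" ∈ (PySem.Dict.mk it).keys := by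
    simpa [PySem.Dict.keys] using hmem
  obtain ⟨days, hdays⟩ : ∃ days, (PySem.Dict.mk it).get? "itinerary" = some days := by
    cases hg : (PySem.Dict.mk it).get? "itinerary" with
    | none => exact absurd hkeys ((PySem.Dict.get?_eq_none_iff_not_mem_keys _ _).mp hg)
    | some days => exact ⟨days, rfl⟩
  show apply_personalization it tags = apply_personalization_alt it tags
  unfold apply_personalization apply_personalization_alt
  simp only [hdays]
  cases hn : pvNoteB tags with
  | some n =>
      simp only [stepA_fold, hn]
  | none =>
      simp only [stepA_fold, hn]
      have hid : days.map (fun day => (PySem.Dict.mk day).items) = days :=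
        List.map_id' days
      have hcont : (PySem.Dict.mk it).contains "itinerary" = true := by
        rw [PySem.Dict.contains_eq_isSome_get?, hdays]; rfl
      rw [hid, PySem.Dict.items_insert, if_pos hcont]
      exact overwrite_self it "itinerary" days hnd hdays
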